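-- pv_equiv track=rewrite | github.com/Rhn12/BaekJoon | 백준/Diamond/22347. 공통 괄호 문자열 사전/공통 괄호 문자열 사전.py | generate_valid_substrings
-- ===== SOURCE A (Python) =====
-- def generate_valid_substrings(s):
--     valid_substrings = set()
--     n = len(s)
--     for start in range(n):
--         stack = 0
--         for end in range(start, n):
--             if s[end] == '(':
--                 stack += 1
--             elif s[end] == ')':
--                 stack -= 1
--             if stack < 0:
--                 break
--             substring = s[start:end + 1]
--             if stack == 0:
--                 valid_substrings.add(substring)
--     return valid_substrings
-- ===== SOURCE B (Python) =====
-- def generate_valid_substrings(s):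
--     n = len(s)
--     match = [None] * n
--     st = []
--     for i, c in enumerate(s):
--         if c == '(':
--             st.append(i)
--         elif c == ')':
--             if st:
--                 match[st.pop()] = i
--     valid_substrings = set()
--     for i in range(n):
--         j = i
--         while j < n:
--             c = s[j]
--             if c == ')':
--                 break
--             if c == '(':
--                 m = match[j]
--                 if m is None:
--                     break
--                 j = m + 1
--             else:
--                 j += 1
--             valid_substrings.add(s[i:j])
--     return valid_substrings
-- ===== Notes on version B (the rewrite author's own statement) =====
-- stated objective: alternative
-- what changed: Replaces A's per-start character-by-character counter rescans with one stack pass that builds a parenthesis match table, then enumerates each start's balanced substrings by jumping block-to-block: a non-paren character advances by one, a matched open paren jumps past its mate, and the walk stops at a close paren or an unmatched open paren.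
import Mathlib
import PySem

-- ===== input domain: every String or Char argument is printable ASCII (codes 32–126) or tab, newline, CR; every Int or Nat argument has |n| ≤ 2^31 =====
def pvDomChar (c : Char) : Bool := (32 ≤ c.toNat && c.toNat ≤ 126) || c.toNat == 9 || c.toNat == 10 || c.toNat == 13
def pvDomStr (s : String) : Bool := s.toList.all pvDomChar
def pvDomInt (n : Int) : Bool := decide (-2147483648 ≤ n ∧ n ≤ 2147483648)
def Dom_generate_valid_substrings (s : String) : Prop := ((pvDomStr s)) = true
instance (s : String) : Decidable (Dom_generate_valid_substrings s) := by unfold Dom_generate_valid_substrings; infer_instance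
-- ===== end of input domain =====

-- B replaces A's per-start counter rescans by one stack pass building a paren match table and
-- then block-to-block jumps (objective: alternative decomposition; same result set, same order).

-- ===== PORT A =====
-- A's inner loop 'for end in range(start, n)' with its break, stack counter and set add;
-- s[end] is cs[e], and the slice s[start:end+1] is (cs.drop start).take (end+1-start)
-- (exact by PySem.List.slice_natCast on these in-range Nat bounds).
def pvALoop (cs : List Char) (start : Nat) (e : Nat) (stack : Int) (acc : List String) : List String :=
  if h : e < cs.length then
    let stack' := if cs[e] = '(' then stack + 1 else if cs[e] = ')' then stack - 1 else stack
    if stack' < 0 then acc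
    else
      let acc' := if stack' = 0 then PySem.Set.add acc (String.ofList ((cs.drop start).take (e + 1 - start))) else acc
      pvALoop cs start (e + 1) stack' acc'
  else acc
termination_by cs.length - e

def generate_valid_substrings (s : String) : List String :=
  (List.range s.toList.length).foldl (fun acc start => pvALoop s.toList start start 0 acc) []

-- ===== PORT B =====
-- B's first pass: 'for i, c in enumerate(s)' building the match table with an index stack.
def pvMatchLoop (rest : List Char) (i : Nat) (st : List Nat) (m : List (Option Nat)) : List (Option Nat) :=
  match rest with
  | [] => m
  | c :: r =>
    if c = '(' then pvMatchLoop r (i + 1) (i :: st) m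
    else if c = ')' then
      match st with
      | [] => pvMatchLoop r (i + 1) [] m
      | t :: st' => pvMatchLoop r (i + 1) st' (m.set t (some i))
    else pvMatchLoop r (i + 1) st m

def pvMatchArr (cs : List Char) : List (Option Nat) :=
  pvMatchLoop cs 0 [] (List.replicate cs.length none)

-- B's 'while j < n' jump loop, transliterated with a fuel bound of n (the loop advances j
-- by at least 1 per iteration, so n iterations always suffice; fuel 0 only ever coincides
-- with j ≥ n).  s[i:j] is (cs.drop i).take (j - i), exact by PySem.List.slice_natCast.
def pvBJump (cs : List Char) (mt : List (Option Nat)) (i : Nat) (fuel : Nat) (j : Nat) (acc : List String) : List String :=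
  match fuel with
  | 0 => acc
  | fuel + 1 =>
    if h : j < cs.length then
      if cs[j] = ')' then acc
      else if cs[j] = '(' then
        match mt.getD j none with
        | none => acc
        | some mj => pvBJump cs mt i fuel (mj + 1) (PySem.Set.add acc (String.ofList ((cs.drop i).take (mj + 1 - i))))
      else pvBJump cs mt i fuel (j + 1) (PySem.Set.add acc (String.ofList ((cs.drop i).take (j + 1 - i))))
    else acc

def generate_valid_substrings_alt (s : String) : List String :=
  (List.range s.toList.length).foldl
    (fun acc i => pvBJump s.toList (pvMatchArr s.toList) i s.toList.length i acc) []

-- ===== PRECONDITION & SPEC =====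
def Spec_generate_valid_substrings (s : String) (out : List String) : Prop := out = generate_valid_substrings_alt s
instance (s : String) (out : List String) : Decidable (Spec_generate_valid_substrings s out) := by unfold Spec_generate_valid_substrings; infer_instance

-- ===== CLAIM (what is proved, stated in full; the proofs are below) =====
def Claim_equal_generate_valid_substrings : Prop := ∀ (s : String), Dom_generate_valid_substrings s → Spec_generate_valid_substrings s (generate_valid_substrings s)

-- ===== LEMMAS AND PROOFS =====

-- Proof-side helper: pvScanClose cs d = relative index of the ')' at which a counter scan of cs
-- started at depth d first returns to depth 0 (none if it never does).
def pvScanClose (cs : List Char) (d : Nat) : Option Nat :=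
  match cs with
  | [] => none
  | c :: r =>
    if c = ')' then
      if d = 1 then some 0 else (pvScanClose r (d - 1)).map (· + 1)
    else if c = '(' then (pvScanClose r (d + 1)).map (· + 1)
    else (pvScanClose r d).map (· + 1)

theorem pv_drop_cons (cs : List Char) (e : Nat) (c : Char) (r : List Char)
    (h : cs.drop e = c :: r) : ∃ (he : e < cs.length), cs[e] = c ∧ cs.drop (e + 1) = r := by
  have he : e < cs.length := by
    by_contra hle
    rw [List.drop_eq_nil_of_le (by omega)] at h
    simp at h
  refine ⟨he, ?_, ?_⟩
  · have := List.getElem_drop (xs := cs) (i := e) (j := 0) (h := by rw [h]; simp)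
    simpa [h] using this.symm
  · have h2 : (cs.drop e).tail = cs.drop (e + 1) := List.tail_drop ..
    rw [h] at h2
    simpa using h2.symm

theorem pvALoop_nil (cs : List Char) (start e : Nat) (stack : Int) (acc : List String)
    (h : cs.length ≤ e) : pvALoop cs start e stack acc = acc := by
  rw [pvALoop, dif_neg (by omega)]




theorem pvALoop_step_open (cs : List Char) (start e : Nat) (stack : Int) (acc : List String)
    (he : e < cs.length) (hce : cs[e] = '(') :
    pvALoop cs start e stack acc = if stack + 1 < 0 then acc else
      pvALoop cs start (e + 1) (stack + 1)
        (if stack + 1 = 0 then PySem.Set.add acc (String.ofList ((cs.drop start).take (e + 1 - start))) else acc) := by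
  rw [pvALoop, dif_pos he, hce]; rfl

theorem pvALoop_step_close (cs : List Char) (start e : Nat) (stack : Int) (acc : List String)
    (he : e < cs.length) (hce : cs[e] = ')') :
    pvALoop cs start e stack acc = if stack - 1 < 0 then acc else
      pvALoop cs start (e + 1) (stack - 1)
        (if stack - 1 = 0 then PySem.Set.add acc (String.ofList ((cs.drop start).take (e + 1 - start))) else acc) := by
  rw [pvALoop, dif_pos he, hce]; rfl

theorem pvALoop_step_other (cs : List Char) (start e : Nat) (stack : Int) (acc : List String)
    (he : e < cs.length) (hce1 : cs[e] ≠ '(') (hce2 : cs[e] ≠ ')') :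
    pvALoop cs start e stack acc = if stack < 0 then acc else
      pvALoop cs start (e + 1) stack
        (if stack = 0 then PySem.Set.add acc (String.ofList ((cs.drop start).take (e + 1 - start))) else acc) := by
  rw [pvALoop, dif_pos he]
  simp only [if_neg hce1, if_neg hce2]

theorem pvALoop_noclose (cs : List Char) (start : Nat) :
    ∀ rest e d acc, cs.drop e = rest → 1 ≤ d → pvScanClose rest d = none →
      pvALoop cs start e (d : Int) acc = acc := by
  intro rest
  induction rest with
  | nil =>
    intro e d acc hdrop hd hsc
    exact pvALoop_nil cs start e d acc (by simpa using List.drop_eq_nil_iff.mp hdrop)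
  | cons c r ih =>
    intro e d acc hdrop hd hsc
    obtain ⟨he, hce, hdr⟩ := pv_drop_cons cs e c r hdrop
    by_cases h1 : c = '('
    · subst h1
      rw [show pvScanClose ('(' :: r) d = (pvScanClose r (d + 1)).map (· + 1) from rfl,
        Option.map_eq_none_iff] at hsc
      rw [pvALoop_step_open cs start e d acc he hce, if_neg (by omega), if_neg (by omega)]
      exact_mod_cast ih (e + 1) (d + 1) acc hdr (by omega) hsc
    · by_cases h2 : c = ')'
      · subst h2
        rw [show pvScanClose (')' :: r) d
            = (if d = 1 then some 0 else (pvScanClose r (d - 1)).map (· + 1)) from rfl] at hsc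
        have hd1 : d ≠ 1 := by rintro rfl; simp at hsc
        rw [if_neg hd1, Option.map_eq_none_iff] at hsc
        rw [pvALoop_step_close cs start e d acc he hce, if_neg (by omega), if_neg (by omega)]
        have := ih (e + 1) (d - 1) acc hdr (by omega) hsc
        rw [show (((d - 1 : Nat)) : Int) = (d : Int) - 1 by omega] at this
        exact this
      · rw [show pvScanClose (c :: r) d = (pvScanClose r d).map (· + 1) by
            simp [pvScanClose, h1, h2], Option.map_eq_none_iff] at hsc
        rw [pvALoop_step_other cs start e d acc he (hce ▸ h1) (hce ▸ h2),
          if_neg (by omega), if_neg (by omega)]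
        exact ih (e + 1) d acc hdr (by omega) hsc

theorem pvALoop_close (cs : List Char) (start : Nat) :
    ∀ rest k e d acc, cs.drop e = rest → 1 ≤ d → pvScanClose rest d = some k →
      pvALoop cs start e (d : Int) acc =
        pvALoop cs start (e + k + 1) 0
          (PySem.Set.add acc (String.ofList ((cs.drop start).take (e + k + 1 - start)))) := by
  intro rest
  induction rest with
  | nil => intro k e d acc hdrop hd hsc; simp [pvScanClose] at hsc
  | cons c r ih =>
    intro k e d acc hdrop hd hsc
    obtain ⟨he, hce, hdr⟩ := pv_drop_cons cs e c r hdrop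
    by_cases h1 : c = '('
    · subst h1
      rw [show pvScanClose ('(' :: r) d = (pvScanClose r (d + 1)).map (· + 1) from rfl,
        Option.map_eq_some_iff] at hsc
      obtain ⟨k', hk', hk⟩ := hsc
      rw [pvALoop_step_open cs start e d acc he hce, if_neg (by omega), if_neg (by omega)]
      have := ih k' (e + 1) (d + 1) acc hdr (by omega) hk'
      rw [show e + 1 + k' + 1 = e + k + 1 by omega] at this
      exact_mod_cast this
    · by_cases h2 : c = ')'
      · subst h2
        rw [show pvScanClose (')' :: r) d
            = (if d = 1 then some 0 else (pvScanClose r (d - 1)).map (· + 1)) from rfl] at hsc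
        by_cases hd1 : d = 1
        · subst hd1
          rw [if_pos rfl, Option.some_inj] at hsc
          subst hsc
          rw [show ((1 : Nat) : Int) = 1 from rfl,
            pvALoop_step_close cs start e 1 acc he hce]
          norm_num
        · rw [if_neg hd1, Option.map_eq_some_iff] at hsc
          obtain ⟨k', hk', hk⟩ := hsc
          rw [pvALoop_step_close cs start e d acc he hce, if_neg (by omega), if_neg (by omega)]
          have := ih k' (e + 1) (d - 1) acc hdr (by omega) hk'
          rw [show e + 1 + k' + 1 = e + k + 1 by omega,
            show (((d - 1 : Nat)) : Int) = (d : Int) - 1 by omega] at this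
          exact this
      · rw [show pvScanClose (c :: r) d = (pvScanClose r d).map (· + 1) by
            simp [pvScanClose, h1, h2], Option.map_eq_some_iff] at hsc
        obtain ⟨k', hk', hk⟩ := hsc
        rw [pvALoop_step_other cs start e d acc he (hce ▸ h1) (hce ▸ h2),
          if_neg (by omega), if_neg (by omega)]
        have := ih k' (e + 1) d acc hdr (by omega) hk'
        rw [show e + 1 + k' + 1 = e + k + 1 by omega] at this
        exact this

theorem pv_getD_set_ne (m : List (Option Nat)) (t p : Nat) (v : Option Nat) (h : p ≠ t) :
    (m.set t v).getD p none = m.getD p none := by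
  rw [List.getD_eq_getElem?_getD, List.getD_eq_getElem?_getD, List.getElem?_set_ne (by omega)]

theorem pv_getD_set_self (m : List (Option Nat)) (t : Nat) (v : Option Nat) (h : t < m.length) :
    (m.set t v).getD t none = v := by
  rw [List.getD_eq_getElem?_getD, List.getElem?_set_self h]
  rfl

theorem pv_getD_replicate (n j : Nat) :
    (List.replicate n (none : Option Nat)).getD j none = none := by
  rw [List.getD_eq_getElem?_getD, List.getElem?_replicate]
  split <;> rfl

theorem pv_map_succ (o : Option Nat) (a : Nat) :
    (o.map (· + 1)).map (fun off => a + off) = o.map (fun off => a + 1 + off) := by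
  cases o <;> simp
  omega

theorem pvMatchLoop_spec :
    ∀ (rest : List Char) (i : Nat) (st : List Nat) (m : List (Option Nat)),
      (∀ t ∈ st, t < i) → st.Nodup → i + rest.length ≤ m.length →
      (∀ t ∈ st, m.getD t none = none) →
      (∀ q, i ≤ q → m.getD q none = none) →
      (∀ p, p < i → p ∉ st → (pvMatchLoop rest i st m).getD p none = m.getD p none) ∧
      (∀ k (hk : k < st.length), (pvMatchLoop rest i st m).getD st[k] none
          = (pvScanClose rest (k + 1)).map (fun off => i + off)) ∧
      (∀ d (hd : d < rest.length), rest[d] = '(' →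
          (pvMatchLoop rest i st m).getD (i + d) none
            = (pvScanClose (rest.drop (d + 1)) 1).map (fun off => i + d + 1 + off)) := by
  intro rest
  induction rest with
  | nil =>
    intro i st m hlt hnd hlen hstnone hge
    refine ⟨fun p _ _ => rfl, fun k hk => ?_, fun d hd => by simp at hd⟩
    show m.getD st[k] none = (pvScanClose [] (k + 1)).map _
    rw [show pvScanClose [] (k + 1) = none from rfl, Option.map_none]
    exact hstnone _ (st.getElem_mem hk)
  | cons c r ih =>
    intro i st m hlt hnd hlen hstnone hge
    by_cases h1 : c = '('
    · subst h1
      have hR : pvMatchLoop ('(' :: r) i st m = pvMatchLoop r (i + 1) (i :: st) m := rfl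
      obtain ⟨A', B', C'⟩ := ih (i + 1) (i :: st) m
        (by intro t ht
            exact (List.mem_cons.mp ht).elim (fun h => by omega) (fun h => Nat.lt_succ_of_lt (hlt t h)))
        (List.nodup_cons.mpr ⟨fun hmem => absurd (hlt i hmem) (lt_irrefl i), hnd⟩)
        (by simp at hlen ⊢; omega)
        (by intro t ht
            exact (List.mem_cons.mp ht).elim (fun h => h ▸ hge i (le_refl i)) (fun h => hstnone t h))
        (fun q hq => hge q (by omega))
      refine ⟨?_, ?_, ?_⟩
      · intro p hp hpst
        rw [hR]
        exact A' p (by omega) (fun hmem => (List.mem_cons.mp hmem).elim (fun h => absurd h (by omega)) hpst)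
      · intro k hk
        rw [hR, show pvScanClose ('(' :: r) (k + 1) = (pvScanClose r (k + 2)).map (· + 1) from rfl,
          pv_map_succ]
        have := B' (k + 1) (by simp; omega)
        simpa using this
      · intro d hd hdc
        rw [hR]
        cases d with
        | zero =>
          have := B' 0 (by simp)
          simpa using this
        | succ d' =>
          have hd' : d' < r.length := by simp at hd; omega
          have hc' : r[d'] = '(' := by simpa using hdc
          have := C' d' hd' hc'
          rw [show i + (d' + 1) = i + 1 + d' by omega, List.drop_succ_cons]
          exact this
    · by_cases h2 : c = ')'
      · subst h2
        cases st with
        | nil =>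
          have hR : pvMatchLoop (')' :: r) i [] m = pvMatchLoop r (i + 1) [] m := rfl
          obtain ⟨A', B', C'⟩ := ih (i + 1) [] m (by simp) (by simp) (by simp at hlen ⊢; omega)
            (by simp) (fun q hq => hge q (by omega))
          refine ⟨?_, ?_, ?_⟩
          · intro p hp hpst
            rw [hR]; exact A' p (by omega) (by simp)
          · intro k hk; simp at hk
          · intro d hd hdc
            rw [hR]
            cases d with
            | zero => simp at hdc
            | succ d' =>
              have hd' : d' < r.length := by simp at hd; omega
              have := C' d' hd' (by simpa using hdc)
              rw [show i + (d' + 1) = i + 1 + d' by omega, show i + 1 + d' + 1 = i + 1 + d' + 1 by omega,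
                List.drop_succ_cons]
              exact this
        | cons t st' =>
          have hR : pvMatchLoop (')' :: r) i (t :: st') m
              = pvMatchLoop r (i + 1) st' (m.set t (some i)) := rfl
          have htlt : t < i := hlt t List.mem_cons_self
          have htm : t < m.length := by simp at hlen; omega
          have htnotin : t ∉ st' := (List.nodup_cons.mp hnd).1
          obtain ⟨A', B', C'⟩ := ih (i + 1) st' (m.set t (some i))
            (fun u hu => Nat.lt_succ_of_lt (hlt u (List.mem_cons_of_mem _ hu)))
            ((List.nodup_cons.mp hnd).2)
            (by simp at hlen ⊢; omega)
            (by intro u hu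
                rw [pv_getD_set_ne m t u _ (fun h => htnotin (h ▸ hu))]
                exact hstnone u (List.mem_cons_of_mem _ hu))
            (by intro q hq
                rw [pv_getD_set_ne m t q _ (by omega)]
                exact hge q (by omega))
          refine ⟨?_, ?_, ?_⟩
          · intro p hp hpst
            rw [hR, A' p (by omega) (fun h => hpst (List.mem_cons_of_mem _ h)),
              pv_getD_set_ne m t p _ (fun h => hpst (h ▸ List.mem_cons_self))]
          · intro k hk
            cases k with
            | zero =>
              rw [hR]
              show _ = (pvScanClose (')' :: r) 1).map _
              rw [show pvScanClose (')' :: r) 1 = some 0 from rfl]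
              simp only [List.getElem_cons_zero, Option.map_some]
              rw [A' t (by omega) htnotin, pv_getD_set_self m t _ htm]
              norm_num
            | succ k' =>
              rw [hR, show pvScanClose (')' :: r) (k' + 1 + 1)
                  = (pvScanClose r (k' + 1)).map (· + 1) by
                    simp [pvScanClose], pv_map_succ]
              have := B' k' (by simp at hk; omega)
              simpa using this
          · intro d hd hdc
            rw [hR]
            cases d with
            | zero => simp at hdc
            | succ d' =>
              have hd' : d' < r.length := by simp at hd; omega
              have := C' d' hd' (by simpa using hdc)
              rw [show i + (d' + 1) = i + 1 + d' by omega, show i + 1 + d' + 1 = i + 1 + d' + 1 by omega,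
                List.drop_succ_cons]
              exact this
      · have hR : pvMatchLoop (c :: r) i st m = pvMatchLoop r (i + 1) st m := by
          rw [pvMatchLoop.eq_def]
          simp only [if_neg h1, if_neg h2]
        obtain ⟨A', B', C'⟩ := ih (i + 1) st m
          (fun t ht => Nat.lt_succ_of_lt (hlt t ht)) hnd (by simp at hlen ⊢; omega)
          hstnone (fun q hq => hge q (by omega))
        refine ⟨?_, ?_, ?_⟩
        · intro p hp hpst
          rw [hR]; exact A' p (by omega) hpst
        · intro k hk
          rw [hR, show pvScanClose (c :: r) (k + 1) = (pvScanClose r (k + 1)).map (· + 1) by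
            simp [pvScanClose, h1, h2], pv_map_succ]
          have := B' k hk
          simpa using this
        · intro d hd hdc
          rw [hR]
          cases d with
          | zero => exact absurd (by simpa using hdc) h1
          | succ d' =>
            have hd' : d' < r.length := by simp at hd; omega
            have := C' d' hd' (by simpa using hdc)
            rw [show i + (d' + 1) = i + 1 + d' by omega, List.drop_succ_cons]
            exact this

theorem pvMatchArr_spec (cs : List Char) (j : Nat) (hj : j < cs.length) (hc : cs[j] = '(') :
    (pvMatchArr cs).getD j none = (pvScanClose (cs.drop (j + 1)) 1).map (fun off => j + 1 + off) := by
  obtain ⟨-, -, C'⟩ := pvMatchLoop_spec cs 0 [] (List.replicate cs.length none)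
    (by simp) (by simp) (by simp) (by simp) (fun q _ => pv_getD_replicate _ _)
  have := C' j hj hc
  simpa using this

theorem pvBJump_nil (cs : List Char) (mt : List (Option Nat)) (i f j : Nat) (acc : List String)
    (h : ¬ j < cs.length) : pvBJump cs mt i (f + 1) j acc = acc := by
  rw [pvBJump, dif_neg h]

theorem pvBJump_close (cs : List Char) (mt : List (Option Nat)) (i f j : Nat) (acc : List String)
    (he : j < cs.length) (hce : cs[j] = ')') : pvBJump cs mt i (f + 1) j acc = acc := by
  rw [pvBJump, dif_pos he, hce]; rfl

theorem pvBJump_open (cs : List Char) (mt : List (Option Nat)) (i f j : Nat) (acc : List String)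
    (he : j < cs.length) (hce : cs[j] = '(') :
    pvBJump cs mt i (f + 1) j acc =
      match mt.getD j none with
      | none => acc
      | some mj => pvBJump cs mt i f (mj + 1) (PySem.Set.add acc (String.ofList ((cs.drop i).take (mj + 1 - i)))) := by
  rw [pvBJump, dif_pos he, hce]
  simp

theorem pvBJump_other (cs : List Char) (mt : List (Option Nat)) (i f j : Nat) (acc : List String)
    (he : j < cs.length) (h1 : cs[j] ≠ '(') (h2 : cs[j] ≠ ')') :
    pvBJump cs mt i (f + 1) j acc
      = pvBJump cs mt i f (j + 1) (PySem.Set.add acc (String.ofList ((cs.drop i).take (j + 1 - i)))) := by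
  rw [pvBJump, dif_pos he, if_neg h2, if_neg h1]

theorem pvALoop_eq_pvBJump (cs : List Char) (i : Nat) :
    ∀ fuel e acc, cs.length - e ≤ fuel →
      pvALoop cs i e 0 acc = pvBJump cs (pvMatchArr cs) i fuel e acc := by
  intro fuel
  induction fuel with
  | zero =>
    intro e acc h
    rw [show pvBJump cs (pvMatchArr cs) i 0 e acc = acc from rfl]
    exact pvALoop_nil cs i e 0 acc (by omega)
  | succ f ih =>
    intro e acc h
    by_cases he : e < cs.length
    · by_cases h1 : cs[e] = '('
      · rw [pvALoop_step_open cs i e 0 acc he h1, if_neg (by norm_num), if_neg (by norm_num),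
          pvBJump_open cs (pvMatchArr cs) i f e acc he h1, pvMatchArr_spec cs e he h1]
        cases hm : pvScanClose (cs.drop (e + 1)) 1 with
        | none =>
          rw [Option.map_none]
          exact pvALoop_noclose cs i (cs.drop (e + 1)) (e + 1) 1 acc rfl (by omega) hm
        | some k =>
          rw [Option.map_some]
          have hA := pvALoop_close cs i (cs.drop (e + 1)) k (e + 1) 1 acc rfl (by omega) hm
          rw [show ((1 : Nat) : Int) = (0 : Int) + 1 from rfl] at hA
          rw [hA]
          exact ih (e + 1 + k + 1) _ (by omega)
      · by_cases h2 : cs[e] = ')'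
        · rw [pvALoop_step_close cs i e 0 acc he h2, if_pos (by norm_num)]
          rw [pvBJump_close cs (pvMatchArr cs) i f e acc he h2]
        · rw [pvALoop_step_other cs i e 0 acc he h1 h2, if_neg (by norm_num), if_pos rfl,
            pvBJump_other cs (pvMatchArr cs) i f e acc he h1 h2]
          exact ih (e + 1) _ (by omega)
    · rw [pvBJump_nil cs (pvMatchArr cs) i f e acc he]
      exact pvALoop_nil cs i e 0 acc (by omega)

-- ===== VERDICT (by name: the statement is the Claim_ definition above) =====
theorem generate_valid_substrings_spec : Claim_equal_generate_valid_substrings := by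
  intro s _
  unfold Spec_generate_valid_substrings generate_valid_substrings generate_valid_substrings_alt
  have hf : (fun (acc : List String) start => pvALoop s.toList start start 0 acc)
      = fun acc i => pvBJump s.toList (pvMatchArr s.toList) i s.toList.length i acc := by
    funext acc i
    exact pvALoop_eq_pvBJump s.toList i s.toList.length i acc (by omega)
  rw [hf]
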